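-- pv_equiv track=rewrite | github.com/fernando29hernandez/-SA-TareaDocker_201403624 | app/Server.py | get_possible_moves
-- ===== SOURCE A (Python) =====
-- def find_lines(board, i, j, player):
--     """
--     Find all the uninterupted lines of stones that would be captured if player
--     plays column i and row j.
--     """
--     lines = []
--     for xdir, ydir in [[0, 1], [1, 1], [1, 0], [1, -1], [0, -1], [-1, -1],
--                        [-1, 0], [-1, 1]]:
--         u = i
--         v = j
--         line = []
--
--         u += xdir
--         v += ydir
--         found = False
--         while u >= 0 and u < len(board) and v >= 0 and v < len(board):
--             if board[v][u] == 0: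
--                 break
--             elif board[v][u] == player:
--                 found = True
--                 break
--             else:
--                line.append((u,v))
--             u += xdir
--             v += ydir
--         if found and line:
--             lines.append(line)
--     return lines
--
-- def get_possible_moves(board, player):
--     """
--     Return a list of all possible (column,row) tuples that player can play on
--     the current board.
--     """
--     result = []
--     for i in range(len(board)):
--         for j in range(len(board)):
--             if board[j][i] == 0:
--                 lines = find_lines(board,i,j,player)
--                 if lines:
--                     result.append((i,j))
--     return result
-- ===== SOURCE B (Python) =====
-- def get_possible_moves(board, player):
--     """
--     Return a list of all possible (column,row) tuples that player can play on
--     the current board.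
--     """
--     n = len(board)
--     moves = set()
--
--     def ray(x, y, dx, dy):
--         cells = []
--         while 0 <= x < n and 0 <= y < n:
--             cells.append((x, y))
--             x += dx
--             y += dy
--         return cells
--
--     def scan(cells):
--         # one pass along a line: a maximal run of opponent stones bracketed by
--         # the player's stone on one side and an empty cell on the other makes
--         # that empty cell a legal move
--         left = None          # None | ('P',) | ('E', (x, y))
--         in_run = False
--         for (x, y) in cells:
--             c = board[y][x]
--             if c != 0 and c != player:
--                 in_run = True
--             elif c == player:
--                 if in_run and left is not None and left[0] == 'E':
--                     moves.add(left[1])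
--                 left, in_run = ('P',), False
--             else:
--                 if in_run and left is not None and left[0] == 'P':
--                     moves.add((x, y))
--                 left, in_run = ('E', (x, y)), False
--
--     for j in range(n):
--         scan(ray(0, j, 1, 0))
--     for i in range(n):
--         scan(ray(i, 0, 0, 1))
--     for i in range(n):
--         scan(ray(i, 0, 1, 1))
--         scan(ray(i, 0, -1, 1))
--     for j in range(1, n):
--         scan(ray(0, j, 1, 1))
--         scan(ray(n - 1, j, -1, 1))
--
--     return [(i, j) for i in range(n) for j in range(n) if (i, j) in moves]
-- ===== Notes on version B (the rewrite author's own statement) =====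
-- stated objective: alternative
-- what changed: B replaces A's per-empty-cell probe of all 8 directions (re-walking opponent runs from every empty cell) by a single forward pass over each row, column and diagonal: it detects each maximal run of opponent stones once and, when the run is bracketed by a player stone on one side and an empty cell on the other, records that empty cell in a set, then emits the set in grid order.
import Mathlib
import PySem

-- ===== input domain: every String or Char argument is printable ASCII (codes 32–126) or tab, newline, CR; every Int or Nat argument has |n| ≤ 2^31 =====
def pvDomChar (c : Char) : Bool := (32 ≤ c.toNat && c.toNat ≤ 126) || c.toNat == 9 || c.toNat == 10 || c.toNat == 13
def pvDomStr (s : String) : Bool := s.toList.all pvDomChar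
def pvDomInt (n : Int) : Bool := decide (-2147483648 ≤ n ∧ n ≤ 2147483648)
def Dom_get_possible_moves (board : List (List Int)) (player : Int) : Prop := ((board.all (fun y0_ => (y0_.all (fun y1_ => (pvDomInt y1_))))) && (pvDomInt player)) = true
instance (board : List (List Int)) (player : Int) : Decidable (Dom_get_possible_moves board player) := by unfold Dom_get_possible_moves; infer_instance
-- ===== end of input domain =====

-- B replaces A's per-empty-cell probe of all 8 directions by ONE forward pass over each row,
-- column and diagonal: each maximal run of opponent stones bracketed by a player stone on one
-- side and an empty cell on the other marks that empty cell as a move (collected in a set,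
-- emitted in grid order).

-- ===== PORT A =====

-- board[v][u]; exact for every access both programs make under Pre_ (0 ≤ v < len(board), 0 ≤ u < len(board) ≤ row length)
def pvCell (board : List (List Int)) (v u : Int) : Int :=
  (board.getD v.toNat []).getD u.toNat 0

def pvDirs : List (Int × Int) :=
  [(0, 1), (1, 1), (1, 0), (1, -1), (0, -1), (-1, -1), (-1, 0), (-1, 1)]

-- the while-loop of find_lines; fuel len(board)+2 is enough because each step moves one coordinate by ±1
def pvWhileA (board : List (List Int)) (player xdir ydir : Int) :
    Nat → Int → Int → List (Int × Int) → Bool × List (Int × Int)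
  | 0, _, _, line => (false, line)
  | fuel + 1, u, v, line =>
    if 0 ≤ u ∧ u < (board.length : Int) ∧ 0 ≤ v ∧ v < (board.length : Int) then
      if pvCell board v u = 0 then (false, line)
      else if pvCell board v u = player then (true, line)
      else pvWhileA board player xdir ydir fuel (u + xdir) (v + ydir) (line ++ [(u, v)])
    else (false, line)

def find_lines (board : List (List Int)) (i j player : Int) : List (List (Int × Int)) :=
  pvDirs.foldl (fun lines d =>
    let r := pvWhileA board player d.1 d.2 (board.length + 2) (i + d.1) (j + d.2) []
    if r.1 && !r.2.isEmpty then lines ++ [r.2] else lines) []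

def get_possible_moves (board : List (List Int)) (player : Int) : List (Int × Int) :=
  (PySem.List.pyRange 0 (board.length : Int) 1).foldl (fun result i =>
    (PySem.List.pyRange 0 (board.length : Int) 1).foldl (fun result j =>
      if pvCell board j i = 0 then
        if !(find_lines board i j player).isEmpty then result ++ [(i, j)] else result
      else result) result) []

-- ===== PORT B =====

-- board[y][x] on a coordinate pair (B's accessor; exact on the accesses made under Pre_)
def pvAt (board : List (List Int)) (c : Int × Int) : Int :=
  (board.getD c.2.toNat []).getD c.1.toNat 0

-- the cells of one row/column/diagonal, walked from its starting cell while in bounds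
def pvRay (board : List (List Int)) :
    Nat → Int → Int → Int → Int → List (Int × Int)
  | 0, _, _, _, _ => []
  | fuel + 1, x, y, dx, dy =>
    if 0 ≤ x ∧ x < (board.length : Int) ∧ 0 ≤ y ∧ y < (board.length : Int) then
      (x, y) :: pvRay board fuel (x + dx) (y + dy) dx dy
    else []

-- one step of the line scan; state = (left bracket, inside-an-opponent-run?, moves so far)
-- left bracket: none = line start, some none = player stone, some (some e) = empty cell e
def pvScanStep (board : List (List Int)) (player : Int)
    (st : Option (Option (Int × Int)) × Bool × PySem.Set (Int × Int)) (c : Int × Int) :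
    Option (Option (Int × Int)) × Bool × PySem.Set (Int × Int) :=
  let v := pvAt board c
  if v ≠ 0 ∧ v ≠ player then
    (st.1, true, st.2.2)
  else if v = player then
    (some none, false,
      match st.1, st.2.1 with
      | some (some e), true => PySem.Set.add st.2.2 e
      | _, _ => st.2.2)
  else
    (some (some c), false,
      match st.1, st.2.1 with
      | some none, true => PySem.Set.add st.2.2 c
      | _, _ => st.2.2)

def pvScan (board : List (List Int)) (player : Int)
    (ms : PySem.Set (Int × Int)) (cells : List (Int × Int)) : PySem.Set (Int × Int) :=
  (cells.foldl (pvScanStep board player) (none, false, ms)).2.2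

-- the set `moves` after all line scans (rows, columns, both diagonal families)
def pvMovesB (board : List (List Int)) (player : Int) : PySem.Set (Int × Int) :=
  let n : Int := board.length
  let m1 := (PySem.List.pyRange 0 n 1).foldl (fun ms j =>
    pvScan board player ms (pvRay board (board.length + 1) 0 j 1 0)) PySem.Set.empty
  let m2 := (PySem.List.pyRange 0 n 1).foldl (fun ms i =>
    pvScan board player ms (pvRay board (board.length + 1) i 0 0 1)) m1
  let m3 := (PySem.List.pyRange 0 n 1).foldl (fun ms i =>
    pvScan board player (pvScan board player ms (pvRay board (board.length + 1) i 0 1 1))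
      (pvRay board (board.length + 1) i 0 (-1) 1)) m2
  (PySem.List.pyRange 1 n 1).foldl (fun ms j =>
    pvScan board player (pvScan board player ms (pvRay board (board.length + 1) 0 j 1 1))
      (pvRay board (board.length + 1) (n - 1) j (-1) 1)) m3

def get_possible_moves_alt (board : List (List Int)) (player : Int) : List (Int × Int) :=
  let moves := pvMovesB board player
  (PySem.List.pyRange 0 (board.length : Int) 1).foldl (fun result i =>
    (PySem.List.pyRange 0 (board.length : Int) 1).foldl (fun result j =>
      if PySem.Set.contains moves (i, j) then result ++ [(i, j)] else result) result) []

-- ===== PRECONDITION & SPEC =====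

-- Pre_ excludes exactly the ragged boards with a row shorter than len(board): A reads every
-- cell board[j][i] for i, j < len(board) and raises IndexError there.
def Pre_get_possible_moves (board : List (List Int)) (player : Int) : Prop :=
  ∀ row ∈ board, board.length ≤ row.length

instance (board : List (List Int)) (player : Int) : Decidable (Pre_get_possible_moves board player) := by
  unfold Pre_get_possible_moves; infer_instance

def pvWitness_get_possible_moves : List (List Int) × Int :=
  ([[0, 0, 0], [1, -1, 0], [0, 0, 0]], 1)

def Spec_get_possible_moves (board : List (List Int)) (player : Int) (out : List (Int × Int)) : Prop := out = get_possible_moves_alt board player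
instance (board : List (List Int)) (player : Int) (out : List (Int × Int)) : Decidable (Spec_get_possible_moves board player out) := by unfold Spec_get_possible_moves; infer_instance

-- ===== CLAIM (what is proved, stated in full; the proofs are below) =====
def Claim_equal_get_possible_moves : Prop := ∀ (board : List (List Int)) (player : Int), Dom_get_possible_moves board player → Pre_get_possible_moves board player → Spec_get_possible_moves board player (get_possible_moves board player)

-- ===== LEMMAS AND PROOFS =====

-- ---- A-side characterisation (the while loop of find_lines) ----

def pvInB (n u v : Int) : Bool := decide (0 ≤ u ∧ u < n ∧ 0 ≤ v ∧ v < n)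

def pvStopPos (board : List (List Int)) (player u v : Int) : Bool :=
  !pvInB (board.length : Int) u v || (pvCell board v u == 0) || (pvCell board v u == player)

def pvStopIdx (board : List (List Int)) (player dx dy u0 v0 : Int) (t : Nat) : Bool :=
  pvStopPos board player (u0 + t * dx) (v0 + t * dy)

theorem pvStopIdx_shift (board : List (List Int)) (player dx dy u0 v0 : Int) (t : Nat) :
    pvStopIdx board player dx dy (u0 + dx) (v0 + dy) t = pvStopIdx board player dx dy u0 v0 (t + 1) := by
  simp only [pvStopIdx]
  congr 1 <;> push_cast <;> ring

theorem pvRangeMap_shift (u0 v0 dx dy : Int) (s : Nat) :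
    (List.range (s + 1)).map (fun t : Nat => ((u0 + t * dx, v0 + t * dy) : Int × Int)) =
      (u0, v0) :: (List.range s).map (fun t : Nat => ((u0 + dx + t * dx, v0 + dy + t * dy) : Int × Int)) := by
  rw [List.range_succ_eq_map, List.map_cons, List.map_map]
  refine congrArg₂ _ (by simp) (List.map_congr_left ?_)
  intro t _
  simp only [Function.comp, Nat.succ_eq_add_one]
  push_cast
  refine congrArg₂ _ (by ring) (by ring)

theorem whileA_char (board : List (List Int)) (player dx dy : Int) :
    ∀ (fuel k : Nat) (u0 v0 : Int) (line : List (Int × Int)), k < fuel →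
      pvStopIdx board player dx dy u0 v0 k = true →
      (∀ t, t < k → pvStopIdx board player dx dy u0 v0 t = false) →
      pvWhileA board player dx dy fuel u0 v0 line =
        (pvInB (board.length : Int) (u0 + k * dx) (v0 + k * dy) &&
           !(pvCell board (v0 + k * dy) (u0 + k * dx) == 0) &&
           (pvCell board (v0 + k * dy) (u0 + k * dx) == player),
         line ++ (List.range k).map fun t : Nat => (u0 + t * dx, v0 + t * dy)) := by
  intro fuel
  induction fuel with
  | zero => intro k u0 v0 line hk; exact absurd hk (Nat.not_lt_zero k)
  | succ f ih =>
    intro k u0 v0 line hk hstop hmin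
    cases k with
    | zero =>
      simp only [Nat.cast_zero, zero_mul, add_zero, List.range_zero, List.map_nil, List.append_nil]
      simp only [pvStopIdx, Nat.cast_zero, zero_mul, add_zero, pvStopPos] at hstop
      simp only [pvWhileA]
      by_cases hib : 0 ≤ u0 ∧ u0 < (board.length : Int) ∧ 0 ≤ v0 ∧ v0 < (board.length : Int)
      · have hInB : pvInB (board.length : Int) u0 v0 = true := by simp [pvInB, hib]
        rw [if_pos hib]
        by_cases h0 : pvCell board v0 u0 = 0
        · rw [if_pos h0]; simp [h0]
        · rw [if_neg h0]
          by_cases hpl : pvCell board v0 u0 = player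
          · rw [if_pos hpl]
            have b1 : (pvCell board v0 u0 == 0) = false := by simp [h0]
            have b2 : (pvCell board v0 u0 == player) = true := by simp [hpl]
            simp [hInB, b1, b2]
          · exfalso; simp [pvInB, hib, h0, hpl] at hstop
      · have hInB : pvInB (board.length : Int) u0 v0 = false := by
          unfold pvInB; exact decide_eq_false hib
        rw [if_neg hib]; simp [hInB]
    | succ s =>
      have h0 := hmin 0 (Nat.succ_pos s)
      simp only [pvStopIdx, Nat.cast_zero, zero_mul, add_zero, pvStopPos, Bool.or_eq_false_iff,
        Bool.not_eq_false', beq_eq_false_iff_ne, ne_eq] at h0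
      obtain ⟨⟨hInB, hc0⟩, hcp⟩ := h0
      have hib : 0 ≤ u0 ∧ u0 < (board.length : Int) ∧ 0 ≤ v0 ∧ v0 < (board.length : Int) := by
        simpa [pvInB] using hInB
      simp only [pvWhileA]
      rw [if_pos hib, if_neg hc0, if_neg hcp]
      rw [ih s (u0 + dx) (v0 + dy) (line ++ [(u0, v0)]) (by omega)
        (by rw [pvStopIdx_shift]; exact hstop)
        (fun t ht => by rw [pvStopIdx_shift]; exact hmin (t + 1) (by omega))]
      rw [pvRangeMap_shift, List.append_assoc]
      refine congrArg₂ _ ?_ rfl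
      have e1 : u0 + dx + (s : Int) * dx = u0 + ((s : Nat) + 1 : Nat) * dx := by push_cast; ring
      have e2 : v0 + dy + (s : Int) * dy = v0 + ((s : Nat) + 1 : Nat) * dy := by push_cast; ring
      rw [e1, e2]

theorem stop_top (board : List (List Int)) (player dx dy u0 v0 : Int)
    (hd : dx = 1 ∨ dx = -1 ∨ (dx = 0 ∧ (dy = 1 ∨ dy = -1)))
    (hu1 : -1 ≤ u0) (hu2 : u0 ≤ (board.length : Int))
    (hv1 : -1 ≤ v0) (hv2 : v0 ≤ (board.length : Int)) :
    pvStopIdx board player dx dy u0 v0 (board.length + 1) = true := by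
  have hInB : pvInB (board.length : Int)
      (u0 + ((board.length + 1 : Nat) : Int) * dx) (v0 + ((board.length + 1 : Nat) : Int) * dy) = false := by
    unfold pvInB
    apply decide_eq_false
    push_cast
    rcases hd with h | h | ⟨h, h' | h'⟩ <;> subst h <;> try subst h'
    all_goals intro ⟨a, b, c, d⟩ <;> omega
  simp only [pvStopIdx, pvStopPos, Bool.or_eq_true, Bool.not_eq_eq_eq_not, Bool.not_true, beq_iff_eq]
  left; left
  push_cast at hInB ⊢
  exact hInB

def pvMoveVia (board : List (List Int)) (player i j dx dy : Int) : Prop :=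
  ∃ k : Nat, 1 ≤ k ∧ (∀ t, t < k → pvStopIdx board player dx dy (i + dx) (j + dy) t = false) ∧
    pvInB (board.length : Int) (i + dx + k * dx) (j + dy + k * dy) = true ∧
    pvCell board (j + dy + k * dy) (i + dx + k * dx) ≠ 0 ∧
    pvCell board (j + dy + k * dy) (i + dx + k * dx) = player

theorem pvDirs_facts : ∀ d ∈ pvDirs,
    (d.1 = 1 ∨ d.1 = -1 ∨ (d.1 = 0 ∧ (d.2 = 1 ∨ d.2 = -1))) ∧ (-1 ≤ d.2 ∧ d.2 ≤ 1) := by decide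

theorem dir_bounds (dx dy : Int)
    (hd : dx = 1 ∨ dx = -1 ∨ (dx = 0 ∧ (dy = 1 ∨ dy = -1)))
    (hdy : -1 ≤ dy ∧ dy ≤ 1) : -1 ≤ dx ∧ dx ≤ 1 := by
  rcases hd with h | h | ⟨h, _⟩ <;> omega

theorem condA_iff (board : List (List Int)) (player i j dx dy : Int)
    (hd : dx = 1 ∨ dx = -1 ∨ (dx = 0 ∧ (dy = 1 ∨ dy = -1)))
    (hdy : -1 ≤ dy ∧ dy ≤ 1)
    (hi : 0 ≤ i ∧ i < (board.length : Int)) (hj : 0 ≤ j ∧ j < (board.length : Int)) :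
    ((pvWhileA board player dx dy (board.length + 2) (i + dx) (j + dy) []).1 &&
      !(pvWhileA board player dx dy (board.length + 2) (i + dx) (j + dy) []).2.isEmpty) = true ↔
    pvMoveVia board player i j dx dy := by
  have hdx := dir_bounds dx dy hd hdy
  have hex : ∃ t, pvStopIdx board player dx dy (i + dx) (j + dy) t = true :=
    ⟨board.length + 1, stop_top board player dx dy (i + dx) (j + dy) hd
      (by omega) (by omega) (by omega) (by omega)⟩
  set k := Nat.find hex with hkdef
  have hkstop : pvStopIdx board player dx dy (i + dx) (j + dy) k = true := Nat.find_spec hex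
  have hkmin : ∀ t, t < k → pvStopIdx board player dx dy (i + dx) (j + dy) t = false := by
    intro t ht
    have := Nat.find_min hex ht
    simpa using this
  have hkle : k ≤ board.length + 1 := Nat.find_min' hex (stop_top board player dx dy (i + dx) (j + dy) hd
      (by omega) (by omega) (by omega) (by omega))
  rw [whileA_char board player dx dy (board.length + 2) k (i + dx) (j + dy) [] (by omega) hkstop hkmin]
  simp only [List.nil_append, Bool.and_eq_true, Bool.not_eq_eq_eq_not, Bool.not_true,
    beq_eq_false_iff_ne, ne_eq, beq_iff_eq, List.isEmpty_eq_false_iff, List.ne_nil_iff_exists_cons]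
  constructor
  · rintro ⟨⟨⟨hInB, hc0⟩, hcp⟩, hne⟩
    have hk1 : 1 ≤ k := by
      by_contra h
      have hk0 : k = 0 := by omega
      rw [hk0] at hne
      simp at hne
    exact ⟨k, hk1, hkmin, hInB, hc0, hcp⟩
  · rintro ⟨m, hm1, hmmin, hInB, hc0, hcp⟩
    have hPm : pvStopIdx board player dx dy (i + dx) (j + dy) m = true := by
      simp [pvStopIdx, pvStopPos, hcp]
    have hkm : k = m := by
      have h1 : k ≤ m := Nat.find_min' hex hPm
      have h2 : ¬ k < m := fun hlt => by rw [hmmin k hlt] at hkstop; exact Bool.false_ne_true hkstop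
      omega
    rw [hkm]
    refine ⟨⟨⟨hInB, hc0⟩, hcp⟩, ?_⟩
    have : 0 < m := hm1
    rcases m with _ | m'
    · omega
    · rw [List.range_succ_eq_map, List.map_cons]
      exact ⟨_, _, rfl⟩

theorem find_lines_char (board : List (List Int)) (player i j : Int) :
    (!(find_lines board i j player).isEmpty) = true ↔
      ∃ d ∈ pvDirs, ((pvWhileA board player d.1 d.2 (board.length + 2) (i + d.1) (j + d.2) []).1 &&
        !(pvWhileA board player d.1 d.2 (board.length + 2) (i + d.1) (j + d.2) []).2.isEmpty) = true := by
  have h1 : find_lines board i j player = List.foldl (fun acc d =>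
      if ((pvWhileA board player d.1 d.2 (board.length + 2) (i + d.1) (j + d.2) []).1 &&
          !(pvWhileA board player d.1 d.2 (board.length + 2) (i + d.1) (j + d.2) []).2.isEmpty) = true
      then acc ++ [(pvWhileA board player d.1 d.2 (board.length + 2) (i + d.1) (j + d.2) []).2]
      else acc) [] pvDirs := rfl
  rw [h1, PySem.List.foldl_append_if]
  simp [List.isEmpty_eq_false_iff, List.filter_eq_nil_iff]

-- ---- B-side: patterns found by the line scan ----

def pvOppc (board : List (List Int)) (player : Int) (c : Int × Int) : Prop :=
  pvAt board c ≠ 0 ∧ pvAt board c ≠ player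

-- a bracketed opponent run strictly inside the scanned line: opponents at positions p+1..p+k,
-- brackets at p and p+k+1, one empty (the move cell z) and the other a player stone
def pvPat (board : List (List Int)) (player : Int) (l : List (Int × Int)) (z : Int × Int) : Prop :=
  ∃ p k : Nat, 1 ≤ k ∧ p + k + 1 < l.length ∧
    (∀ t, 1 ≤ t → t ≤ k → pvOppc board player (l.getD (p + t) (0, 0))) ∧
    ((pvAt board (l.getD p (0, 0)) = 0 ∧ pvAt board (l.getD (p + k + 1) (0, 0)) = player ∧ z = l.getD p (0, 0)) ∨
     (pvAt board (l.getD p (0, 0)) = player ∧ pvAt board (l.getD (p + k + 1) (0, 0)) = 0 ∧ z = l.getD (p + k + 1) (0, 0)))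

-- a bracketed run whose left bracket is already in the scan state
def pvBPat (board : List (List Int)) (player : Int) (left : Option (Option (Int × Int)))
    (inRun : Bool) (l : List (Int × Int)) (z : Int × Int) : Prop :=
  match left with
  | none => False
  | some none => ∃ k : Nat, (1 ≤ k ∨ inRun = true) ∧ k < l.length ∧
      (∀ t, t < k → pvOppc board player (l.getD t (0, 0))) ∧
      pvAt board (l.getD k (0, 0)) = 0 ∧ z = l.getD k (0, 0)
  | some (some e) => ∃ k : Nat, (1 ≤ k ∨ inRun = true) ∧ k < l.length ∧
      (∀ t, t < k → pvOppc board player (l.getD t (0, 0))) ∧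
      pvAt board (l.getD k (0, 0)) = player ∧ z = e

theorem pat_nil (board : List (List Int)) (player : Int) (z : Int × Int) :
    ¬ pvPat board player [] z := by
  rintro ⟨p, k, _, hlen, _, _⟩
  simp at hlen

theorem bpat_nil (board : List (List Int)) (player : Int) (left : Option (Option (Int × Int)))
    (inRun : Bool) (z : Int × Int) : ¬ pvBPat board player left inRun [] z := by
  rcases left with _ | _ | e <;> (try exact fun h => h) <;>
    (rintro ⟨k, _, hlen, _⟩; simp at hlen)

-- splitting a pattern search at the head of the line
theorem pat_cons_iff (board : List (List Int)) (player : Int) (c : Int × Int)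
    (l : List (Int × Int)) (z : Int × Int) :
    pvPat board player (c :: l) z ↔
      (∃ k : Nat, 1 ≤ k ∧ k < l.length ∧ (∀ t, t < k → pvOppc board player (l.getD t (0, 0))) ∧
        ((pvAt board c = 0 ∧ pvAt board (l.getD k (0, 0)) = player ∧ z = c) ∨
         (pvAt board c = player ∧ pvAt board (l.getD k (0, 0)) = 0 ∧ z = l.getD k (0, 0)))) ∨
      pvPat board player l z := by
  constructor
  · rintro ⟨p, k, hk, hlen, hmid, hcase⟩
    cases p with
    | zero =>
      left
      refine ⟨k, hk, by simp at hlen; omega, ?_, ?_⟩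
      · intro t ht
        have := hmid (t + 1) (by omega) (by omega)
        simpa [List.getD_cons_succ] using this
      · simpa [List.getD_cons_zero, List.getD_cons_succ] using hcase
    | succ q =>
      right
      refine ⟨q, k, hk, by simp at hlen; omega, ?_, ?_⟩
      · intro t h1 h2
        have := hmid t h1 h2
        have e : q + 1 + t = (q + t) + 1 := by omega
        rwa [e, List.getD_cons_succ] at this
      · have e1 : q + 1 + k + 1 = (q + k + 1) + 1 := by omega
        rw [e1, List.getD_cons_succ, List.getD_cons_succ] at hcase
        exact hcase
  · rintro (⟨k, hk, hlen, hmid, hcase⟩ | ⟨p, k, hk, hlen, hmid, hcase⟩)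
    · refine ⟨0, k, hk, by simp; omega, ?_, ?_⟩
      · intro t h1 h2
        have e : 0 + t = (t - 1) + 1 := by omega
        rw [e, List.getD_cons_succ]
        have := hmid (t - 1) (by omega)
        exact this
      · have e : 0 + k + 1 = k + 1 := by omega
        rw [e, List.getD_cons_succ]
        simpa [List.getD_cons_zero] using hcase
    · refine ⟨p + 1, k, hk, by simp; omega, ?_, ?_⟩
      · intro t h1 h2
        have e : p + 1 + t = (p + t) + 1 := by omega
        rw [e, List.getD_cons_succ]
        exact hmid t h1 h2
      · have e1 : p + 1 + k + 1 = (p + k + 1) + 1 := by omega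
        rw [e1, List.getD_cons_succ, List.getD_cons_succ]
        exact hcase

theorem bpat_some_none_cons_iff (board : List (List Int)) (player : Int) (c : Int × Int)
    (l : List (Int × Int)) (z : Int × Int) (inRun : Bool) :
    pvBPat board player (some none) inRun (c :: l) z ↔
      (inRun = true ∧ pvAt board c = 0 ∧ z = c) ∨
      (pvOppc board player c ∧ pvBPat board player (some none) true l z) := by
  constructor
  · rintro ⟨k, hk, hlen, hmid, hval, hz⟩
    cases k with
    | zero =>
      left
      rcases hk with hk | hk
      · omega
      · simp only [List.getD_cons_zero] at hval hz
        exact ⟨hk, hval, hz⟩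
    | succ s =>
      right
      have hc := hmid 0 (Nat.succ_pos s)
      simp only [List.getD_cons_zero] at hc
      refine ⟨hc, s, Or.inr rfl, by simp at hlen; omega, ?_, ?_, ?_⟩
      · intro t ht
        have := hmid (t + 1) (by omega)
        simpa [List.getD_cons_succ] using this
      · simpa [List.getD_cons_succ] using hval
      · simpa [List.getD_cons_succ] using hz
  · rintro (⟨hr, hval, hz⟩ | ⟨hc, k, _, hlen, hmid, hval, hz⟩)
    · exact ⟨0, Or.inr hr, by simp, by omega, by simpa [List.getD_cons_zero] using hval,
        by simpa [List.getD_cons_zero] using hz⟩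
    · refine ⟨k + 1, Or.inl (by omega), by simp; omega, ?_, ?_, ?_⟩
      · intro t ht
        cases t with
        | zero => simpa [List.getD_cons_zero] using hc
        | succ s => rw [List.getD_cons_succ]; exact hmid s (by omega)
      · simpa [List.getD_cons_succ] using hval
      · simpa [List.getD_cons_succ] using hz

theorem bpat_some_some_cons_iff (board : List (List Int)) (player : Int) (c e : Int × Int)
    (l : List (Int × Int)) (z : Int × Int) (inRun : Bool) :
    pvBPat board player (some (some e)) inRun (c :: l) z ↔
      (inRun = true ∧ pvAt board c = player ∧ z = e) ∨
      (pvOppc board player c ∧ pvBPat board player (some (some e)) true l z) := by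
  constructor
  · rintro ⟨k, hk, hlen, hmid, hval, hz⟩
    cases k with
    | zero =>
      left
      rcases hk with hk | hk
      · omega
      · simp only [List.getD_cons_zero] at hval
        exact ⟨hk, hval, hz⟩
    | succ s =>
      right
      have hc := hmid 0 (Nat.succ_pos s)
      simp only [List.getD_cons_zero] at hc
      refine ⟨hc, s, Or.inr rfl, by simp at hlen; omega, ?_, ?_, hz⟩
      · intro t ht
        have := hmid (t + 1) (by omega)
        simpa [List.getD_cons_succ] using this
      · simpa [List.getD_cons_succ] using hval
  · rintro (⟨hr, hval, hz⟩ | ⟨hc, k, _, hlen, hmid, hval, hz⟩)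
    · exact ⟨0, Or.inr hr, by simp, by omega, by simpa [List.getD_cons_zero] using hval, hz⟩
    · refine ⟨k + 1, Or.inl (by omega), by simp; omega, ?_, ?_, hz⟩
      · intro t ht
        cases t with
        | zero => simpa [List.getD_cons_zero] using hc
        | succ s => rw [List.getD_cons_succ]; exact hmid s (by omega)
      · simpa [List.getD_cons_succ] using hval

theorem pat_cons_opp (board : List (List Int)) (player : Int) (c : Int × Int)
    (l : List (Int × Int)) (z : Int × Int) (hopp : pvOppc board player c) :
    pvPat board player (c :: l) z ↔ pvPat board player l z := by
  rw [pat_cons_iff]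
  constructor
  · rintro (⟨k, _, _, _, (⟨h0, _, _⟩ | ⟨hpl, _, _⟩)⟩ | h)
    · exact absurd h0 hopp.1
    · exact absurd hpl hopp.2
    · exact h
  · exact Or.inr

theorem bpat_cons_opp (board : List (List Int)) (player : Int) (c : Int × Int)
    (l : List (Int × Int)) (z : Int × Int) (left : Option (Option (Int × Int))) (inRun : Bool)
    (hopp : pvOppc board player c) :
    pvBPat board player left inRun (c :: l) z ↔ pvBPat board player left true l z := by
  rcases left with _ | _ | e
  · exact Iff.rfl
  · rw [bpat_some_none_cons_iff]
    constructor
    · rintro (⟨_, h0, _⟩ | ⟨_, h⟩)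
      · exact absurd h0 hopp.1
      · exact h
    · exact fun h => Or.inr ⟨hopp, h⟩
  · rw [bpat_some_some_cons_iff]
    constructor
    · rintro (⟨_, hpl, _⟩ | ⟨_, h⟩)
      · exact absurd hpl hopp.2
      · exact h
    · exact fun h => Or.inr ⟨hopp, h⟩

theorem pat_cons_player (board : List (List Int)) (player : Int) (c : Int × Int)
    (l : List (Int × Int)) (z : Int × Int) (hp : player ≠ 0) (hpl : pvAt board c = player) :
    pvPat board player (c :: l) z ↔ pvPat board player l z ∨ pvBPat board player (some none) false l z := by
  rw [pat_cons_iff]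
  constructor
  · rintro (⟨k, hk, hlen, hmid, (⟨h0, _, _⟩ | ⟨_, hval, hz⟩)⟩ | h)
    · rw [hpl] at h0; exact absurd h0 hp
    · exact Or.inr ⟨k, Or.inl hk, hlen, hmid, hval, hz⟩
    · exact Or.inl h
  · rintro (h | ⟨k, hk, hlen, hmid, hval, hz⟩)
    · exact Or.inr h
    · rcases hk with hk | hk
      · exact Or.inl ⟨k, hk, hlen, hmid, Or.inr ⟨hpl, hval, hz⟩⟩
      · exact absurd hk (by simp)

theorem bpat_cons_player (board : List (List Int)) (player : Int) (c : Int × Int)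
    (l : List (Int × Int)) (z : Int × Int) (left : Option (Option (Int × Int))) (inRun : Bool)
    (hp : player ≠ 0) (hpl : pvAt board c = player) :
    pvBPat board player left inRun (c :: l) z ↔ (∃ e, left = some (some e) ∧ inRun = true ∧ z = e) := by
  have hnopp : ¬ pvOppc board player c := fun h => h.2 hpl
  rcases left with _ | _ | e
  · exact ⟨fun h => h.elim, by rintro ⟨e, h, _⟩; cases h⟩
  · rw [bpat_some_none_cons_iff]
    constructor
    · rintro (⟨_, h0, _⟩ | ⟨ho, _⟩)
      · rw [hpl] at h0; exact absurd h0 hp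
      · exact absurd ho hnopp
    · rintro ⟨e, h, _⟩; cases h
  · rw [bpat_some_some_cons_iff]
    constructor
    · rintro (⟨hr, _, hz⟩ | ⟨ho, _⟩)
      · exact ⟨e, rfl, hr, hz⟩
      · exact absurd ho hnopp
    · rintro ⟨e', he', hr, hz⟩
      cases he'
      exact Or.inl ⟨hr, hpl, hz⟩

theorem pat_cons_zero (board : List (List Int)) (player : Int) (c : Int × Int)
    (l : List (Int × Int)) (z : Int × Int) (hp : player ≠ 0) (hz : pvAt board c = 0) :
    pvPat board player (c :: l) z ↔ pvPat board player l z ∨ pvBPat board player (some (some c)) false l z := by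
  rw [pat_cons_iff]
  constructor
  · rintro (⟨k, hk, hlen, hmid, (⟨_, hval, hzz⟩ | ⟨hpl, _, _⟩)⟩ | h)
    · exact Or.inr ⟨k, Or.inl hk, hlen, hmid, hval, hzz⟩
    · rw [hz] at hpl; exact absurd hpl.symm hp
    · exact Or.inl h
  · rintro (h | ⟨k, hk, hlen, hmid, hval, hzz⟩)
    · exact Or.inr h
    · rcases hk with hk | hk
      · exact Or.inl ⟨k, hk, hlen, hmid, Or.inl ⟨hz, hval, hzz⟩⟩
      · exact absurd hk (by simp)

theorem bpat_cons_zero (board : List (List Int)) (player : Int) (c : Int × Int)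
    (l : List (Int × Int)) (z : Int × Int) (left : Option (Option (Int × Int))) (inRun : Bool)
    (hp : player ≠ 0) (hz : pvAt board c = 0) :
    pvBPat board player left inRun (c :: l) z ↔ (left = some none ∧ inRun = true ∧ z = c) := by
  have hnopp : ¬ pvOppc board player c := fun h => h.1 hz
  rcases left with _ | _ | e
  · exact ⟨fun h => h.elim, by rintro ⟨h, _⟩; cases h⟩
  · rw [bpat_some_none_cons_iff]
    constructor
    · rintro (⟨hr, _, hzz⟩ | ⟨ho, _⟩)
      · exact ⟨rfl, hr, hzz⟩
      · exact absurd ho hnopp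
    · rintro ⟨_, hr, hzz⟩
      exact Or.inl ⟨hr, hz, hzz⟩
  · rw [bpat_some_some_cons_iff]
    constructor
    · rintro (⟨_, hval, _⟩ | ⟨ho, _⟩)
      · rw [hz] at hval; exact absurd hval.symm hp
      · exact absurd ho hnopp
    · rintro ⟨h, _⟩; cases h

theorem scan_mem (board : List (List Int)) (player : Int) (hp : player ≠ 0) :
    ∀ (l : List (Int × Int)) (left : Option (Option (Int × Int))) (inRun : Bool)
      (ms : PySem.Set (Int × Int)) (z : Int × Int),
      z ∈ (l.foldl (pvScanStep board player) (left, inRun, ms)).2.2 ↔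
        z ∈ ms ∨ pvPat board player l z ∨ pvBPat board player left inRun l z := by
  intro l
  induction l with
  | nil =>
    intro left inRun ms z
    simp only [List.foldl_nil]
    have h1 := pat_nil board player z
    have h2 := bpat_nil board player left inRun z
    tauto
  | cons c l ih =>
    intro left inRun ms z
    rw [List.foldl_cons]
    by_cases hopp : pvAt board c ≠ 0 ∧ pvAt board c ≠ player
    · have hstep : pvScanStep board player (left, inRun, ms) c = (left, true, ms) := by
        simp only [pvScanStep]
        rw [if_pos hopp]
      rw [hstep, ih, pat_cons_opp board player c l z hopp,
        bpat_cons_opp board player c l z left inRun hopp]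
    · by_cases hpl : pvAt board c = player
      · have hstep : pvScanStep board player (left, inRun, ms) c =
            (some none, false,
              match left, inRun with
              | some (some e), true => PySem.Set.add ms e
              | _, _ => ms) := by
          simp only [pvScanStep]
          rw [if_neg hopp, if_pos hpl]
        rw [hstep, ih, pat_cons_player board player c l z hp hpl,
          bpat_cons_player board player c l z left inRun hp hpl]
        rcases left with _ | _ | e <;> cases inRun <;>
          simp [PySem.Set.mem_add] <;> tauto
      · have hz0 : pvAt board c = 0 := by
          by_contra hne
          exact hopp ⟨hne, hpl⟩
        have hstep : pvScanStep board player (left, inRun, ms) c =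
            (some (some c), false,
              match left, inRun with
              | some none, true => PySem.Set.add ms c
              | _, _ => ms) := by
          simp only [pvScanStep]
          rw [if_neg hopp, if_neg hpl]
        rw [hstep, ih, pat_cons_zero board player c l z hp hz0,
          bpat_cons_zero board player c l z left inRun hp hz0]
        rcases left with _ | _ | e <;> cases inRun <;>
          simp [PySem.Set.mem_add] <;> tauto

theorem pvScan_mem (board : List (List Int)) (player : Int) (hp : player ≠ 0)
    (ms : PySem.Set (Int × Int)) (l : List (Int × Int)) (z : Int × Int) :
    z ∈ pvScan board player ms l ↔ z ∈ ms ∨ pvPat board player l z := by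
  unfold pvScan
  rw [scan_mem board player hp l none false ms z]
  have h2 : ¬ pvBPat board player none false l z := fun h => h
  tauto

theorem mem_foldl_acc {β : Type} (f : PySem.Set (Int × Int) → β → PySem.Set (Int × Int))
    (P : β → (Int × Int) → Prop) (hf : ∀ s x y, y ∈ f s x ↔ y ∈ s ∨ P x y) :
    ∀ (l : List β) (s0 : PySem.Set (Int × Int)) (y : Int × Int),
      y ∈ l.foldl f s0 ↔ y ∈ s0 ∨ ∃ x ∈ l, P x y := by
  intro l
  induction l with
  | nil => simp
  | cons a l ih =>
    intro s0 y
    rw [List.foldl_cons, ih, hf]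
    simp only [List.mem_cons]
    constructor
    · rintro (( h | h ) | ⟨x, hx, hP⟩)
      · exact Or.inl h
      · exact Or.inr ⟨a, Or.inl rfl, h⟩
      · exact Or.inr ⟨x, Or.inr hx, hP⟩
    · rintro (h | ⟨x, (rfl | hx), hP⟩)
      · exact Or.inl (Or.inl h)
      · exact Or.inl (Or.inr hP)
      · exact Or.inr ⟨x, hx, hP⟩

def pvRayAt (board : List (List Int)) (x y dx dy : Int) : List (Int × Int) :=
  pvRay board (board.length + 1) x y dx dy

theorem mem_movesB (board : List (List Int)) (player : Int) (hp : player ≠ 0) (z : Int × Int) :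
    z ∈ pvMovesB board player ↔
      (∃ j ∈ PySem.List.pyRange 0 (board.length : Int) 1, pvPat board player (pvRayAt board 0 j 1 0) z) ∨
      (∃ i ∈ PySem.List.pyRange 0 (board.length : Int) 1, pvPat board player (pvRayAt board i 0 0 1) z) ∨
      (∃ i ∈ PySem.List.pyRange 0 (board.length : Int) 1,
        pvPat board player (pvRayAt board i 0 1 1) z ∨ pvPat board player (pvRayAt board i 0 (-1) 1) z) ∨
      (∃ j ∈ PySem.List.pyRange 1 (board.length : Int) 1,
        pvPat board player (pvRayAt board 0 j 1 1) z ∨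
        pvPat board player (pvRayAt board ((board.length : Int) - 1) j (-1) 1) z) := by
  simp only [pvMovesB]
  rw [mem_foldl_acc _ (fun j z =>
      pvPat board player (pvRayAt board 0 j 1 1) z ∨
      pvPat board player (pvRayAt board ((board.length : Int) - 1) j (-1) 1) z)
    (fun s x y => by
      rw [pvScan_mem board player hp _ _ y, pvScan_mem board player hp _ _ y]
      unfold pvRayAt
      tauto)]
  rw [mem_foldl_acc _ (fun i z =>
      pvPat board player (pvRayAt board i 0 1 1) z ∨
      pvPat board player (pvRayAt board i 0 (-1) 1) z)
    (fun s x y => by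
      rw [pvScan_mem board player hp _ _ y, pvScan_mem board player hp _ _ y]
      unfold pvRayAt
      tauto)]
  rw [mem_foldl_acc _ (fun i z => pvPat board player (pvRayAt board i 0 0 1) z)
    (fun s x y => by rw [pvScan_mem board player hp _ _ y]; unfold pvRayAt; exact Iff.rfl)]
  rw [mem_foldl_acc _ (fun j z => pvPat board player (pvRayAt board 0 j 1 0) z)
    (fun s x y => by rw [pvScan_mem board player hp _ _ y]; unfold pvRayAt; exact Iff.rfl)]
  simp [PySem.Set.empty, or_assoc]

-- ---- rays are arithmetic progressions ----

theorem pvRay_eq (board : List (List Int)) :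
    ∀ (fuel L : Nat) (x y dx dy : Int), L < fuel →
      (∀ t : Nat, t < L → pvInB (board.length : Int) (x + t * dx) (y + t * dy) = true) →
      pvInB (board.length : Int) (x + L * dx) (y + L * dy) = false →
      pvRay board fuel x y dx dy = (List.range L).map (fun t : Nat => (x + t * dx, y + t * dy)) := by
  intro fuel
  induction fuel with
  | zero => intro L x y dx dy hLf; exact absurd hLf (Nat.not_lt_zero L)
  | succ f ih =>
    intro L x y dx dy hLf hin hout
    cases L with
    | zero =>
      simp only [Nat.cast_zero, zero_mul, add_zero] at hout
      have hni : ¬ (0 ≤ x ∧ x < (board.length : Int) ∧ 0 ≤ y ∧ y < (board.length : Int)) := by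
        simpa [pvInB] using hout
      simp only [pvRay, List.range_zero, List.map_nil]
      rw [if_neg hni]
    | succ s =>
      have h0 := hin 0 (Nat.succ_pos s)
      simp only [Nat.cast_zero, zero_mul, add_zero] at h0
      have hib : 0 ≤ x ∧ x < (board.length : Int) ∧ 0 ≤ y ∧ y < (board.length : Int) := by
        simpa [pvInB] using h0
      simp only [pvRay]
      rw [if_pos hib]
      rw [ih s (x + dx) (y + dy) dx dy (by omega) ?_ ?_, pvRangeMap_shift]
      · intro t ht
        have e1 : x + dx + (t : Int) * dx = x + ((t + 1 : Nat) : Int) * dx := by push_cast; ring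
        have e2 : y + dy + (t : Int) * dy = y + ((t + 1 : Nat) : Int) * dy := by push_cast; ring
        rw [e1, e2]
        exact hin (t + 1) (by omega)
      · have e1 : x + dx + (s : Int) * dx = x + ((s + 1 : Nat) : Int) * dx := by push_cast; ring
        have e2 : y + dy + (s : Int) * dy = y + ((s + 1 : Nat) : Int) * dy := by push_cast; ring
        rw [e1, e2]
        exact hout

theorem out_exists (board : List (List Int)) (x y dx dy : Int)
    (h : dx = 1 ∨ dy = 1) (hx : 0 ≤ x) (hy : 0 ≤ y) :
    ∃ t : Nat, pvInB (board.length : Int) (x + t * dx) (y + t * dy) = false := by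
  refine ⟨board.length, ?_⟩
  unfold pvInB
  apply decide_eq_false
  intro hcon
  rcases h with h | h
  · subst h
    have hb := hcon.2.1
    simp only [mul_one] at hb
    omega
  · subst h
    have hb := hcon.2.2.2
    simp only [mul_one] at hb
    omega

theorem inB_prefix (nn x0 y0 dx dy : Int) (hbx : -1 ≤ dx ∧ dx ≤ 1) (hby : -1 ≤ dy ∧ dy ≤ 1)
    (h0 : pvInB nn x0 y0 = true) (a b : Nat) (hab : a ≤ b)
    (hb : pvInB nn (x0 + b * dx) (y0 + b * dy) = true) :
    pvInB nn (x0 + a * dx) (y0 + a * dy) = true := by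
  unfold pvInB at h0 hb ⊢
  simp only [decide_eq_true_eq] at h0 hb ⊢
  obtain ⟨hbx1, hbx2⟩ := hbx
  obtain ⟨hby1, hby2⟩ := hby
  interval_cases dx <;> interval_cases dy <;>
    simp only [mul_one, mul_zero, mul_neg_one, add_zero] at hb ⊢ <;> omega

theorem stopIdx_false_iff (board : List (List Int)) (player dx dy u0 v0 : Int) (t : Nat) :
    pvStopIdx board player dx dy u0 v0 t = false ↔
      pvInB (board.length : Int) (u0 + t * dx) (v0 + t * dy) = true ∧
      pvCell board (v0 + t * dy) (u0 + t * dx) ≠ 0 ∧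
      pvCell board (v0 + t * dy) (u0 + t * dx) ≠ player := by
  simp [pvStopIdx, pvStopPos, and_assoc]

-- ---- bridging: patterns on a ray ↔ directional captures ----

theorem pvAt_pair (board : List (List Int)) (u v : Int) :
    pvAt board (u, v) = pvCell board v u := rfl

theorem pvOppc_pair (board : List (List Int)) (player u v : Int) :
    pvOppc board player (u, v) ↔ pvCell board v u ≠ 0 ∧ pvCell board v u ≠ player := Iff.rfl

theorem getD_map_range (f : Nat → Int × Int) (L m : Nat) (h : m < L) :
    ((List.range L).map f).getD m (0, 0) = f m := by
  rw [List.getD_eq_getElem?_getD, List.getElem?_map, List.getElem?_range h]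
  rfl

theorem ray_setup (board : List (List Int)) (x y dx dy : Int)
    (hbx : -1 ≤ dx ∧ dx ≤ 1) (hby : -1 ≤ dy ∧ dy ≤ 1) (hd1 : dx = 1 ∨ dy = 1)
    (hx0 : 0 ≤ x) (hy0 : 0 ≤ y) (h0in : pvInB (board.length : Int) x y = true) :
    ∃ L : Nat,
      pvRayAt board x y dx dy = (List.range L).map (fun t : Nat => (x + t * dx, y + t * dy)) ∧
      (∀ t : Nat, t < L → pvInB (board.length : Int) (x + t * dx) (y + t * dy) = true) ∧
      (∀ t : Nat, pvInB (board.length : Int) (x + t * dx) (y + t * dy) = true → t < L) := by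
  have hex := out_exists board x y dx dy hd1 hx0 hy0
  refine ⟨Nat.find hex, ?_, ?_, ?_⟩
  · unfold pvRayAt
    apply pvRay_eq
    · have hle : Nat.find hex ≤ board.length := Nat.find_min' hex (by
        unfold pvInB
        apply decide_eq_false
        intro hcon
        rcases hd1 with h | h
        · subst h; have hb := hcon.2.1; simp only [mul_one] at hb; omega
        · subst h; have hb := hcon.2.2.2; simp only [mul_one] at hb; omega)
      omega
    · intro t ht
      have := Nat.find_min hex ht
      simpa using this
    · exact Nat.find_spec hex
  · intro t ht
    have := Nat.find_min hex ht
    simpa using this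
  · intro t ht
    by_contra hle
    push_neg at hle
    have := inB_prefix (board.length : Int) x y dx dy hbx hby h0in (Nat.find hex) t hle ht
    rw [Nat.find_spec hex] at this
    exact Bool.false_ne_true this

theorem pat_of_capture_fwd (board : List (List Int)) (player x0 y0 dx dy i j : Int) (pos : Nat)
    (hbx : -1 ≤ dx ∧ dx ≤ 1) (hby : -1 ≤ dy ∧ dy ≤ 1) (hd1 : dx = 1 ∨ dy = 1)
    (hx0 : 0 ≤ x0) (hy0 : 0 ≤ y0) (h0in : pvInB (board.length : Int) x0 y0 = true)
    (hpx : i = x0 + pos * dx) (hpy : j = y0 + pos * dy)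
    (hcell : pvCell board j i = 0)
    (hcap : pvMoveVia board player i j dx dy) :
    pvPat board player (pvRayAt board x0 y0 dx dy) (i, j) := by
  obtain ⟨L, hray, hLin, hLlt⟩ := ray_setup board x0 y0 dx dy hbx hby hd1 hx0 hy0 h0in
  obtain ⟨k, hk1, hstops, hkin, hk0, hkpl⟩ := hcap
  have hend : pos + k + 1 < L := by
    apply hLlt
    have e1 : x0 + ((pos + k + 1 : Nat) : Int) * dx = i + dx + (k : Int) * dx := by
      rw [hpx]; push_cast; ring
    have e2 : y0 + ((pos + k + 1 : Nat) : Int) * dy = j + dy + (k : Int) * dy := by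
      rw [hpy]; push_cast; ring
    rw [e1, e2]
    exact hkin
  refine ⟨pos, k, hk1, ?_, ?_, Or.inl ⟨?_, ?_, ?_⟩⟩
  · rw [hray]; simpa using hend
  · intro t h1t htk
    rw [hray, getD_map_range _ _ _ (by omega), pvOppc_pair]
    have hs := (stopIdx_false_iff board player dx dy (i + dx) (j + dy) (t - 1)).1
      (hstops (t - 1) (by omega))
    have e1 : x0 + ((pos + t : Nat) : Int) * dx = i + dx + ((t - 1 : Nat) : Int) * dx := by
      rw [hpx]; push_cast [Nat.cast_sub h1t]; ring
    have e2 : y0 + ((pos + t : Nat) : Int) * dy = j + dy + ((t - 1 : Nat) : Int) * dy := by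
      rw [hpy]; push_cast [Nat.cast_sub h1t]; ring
    rw [e1, e2]
    exact ⟨hs.2.1, hs.2.2⟩
  · rw [hray, getD_map_range _ _ _ (by omega), pvAt_pair, ← hpx, ← hpy]
    exact hcell
  · rw [hray, getD_map_range _ _ _ hend, pvAt_pair]
    have e1 : x0 + ((pos + k + 1 : Nat) : Int) * dx = i + dx + (k : Int) * dx := by
      rw [hpx]; push_cast; ring
    have e2 : y0 + ((pos + k + 1 : Nat) : Int) * dy = j + dy + (k : Int) * dy := by
      rw [hpy]; push_cast; ring
    rw [e1, e2]
    exact hkpl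
  · rw [hray, getD_map_range _ _ _ (by omega), ← hpx, ← hpy]

theorem pat_of_capture_bwd (board : List (List Int)) (player x0 y0 dx dy i j : Int) (pos : Nat)
    (hbx : -1 ≤ dx ∧ dx ≤ 1) (hby : -1 ≤ dy ∧ dy ≤ 1) (hd1 : dx = 1 ∨ dy = 1)
    (hx0 : 0 ≤ x0) (hy0 : 0 ≤ y0) (h0in : pvInB (board.length : Int) x0 y0 = true)
    (hpx : i = x0 + pos * dx) (hpy : j = y0 + pos * dy)
    (hij : pvInB (board.length : Int) i j = true)
    (hback : ∀ s : Nat, pvInB (board.length : Int) (i - s * dx) (j - s * dy) = true → s ≤ pos)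
    (hcell : pvCell board j i = 0)
    (hcap : pvMoveVia board player i j (-dx) (-dy)) :
    pvPat board player (pvRayAt board x0 y0 dx dy) (i, j) := by
  obtain ⟨L, hray, hLin, hLlt⟩ := ray_setup board x0 y0 dx dy hbx hby hd1 hx0 hy0 h0in
  obtain ⟨k, hk1, hstops, hkin, hk0, hkpl⟩ := hcap
  have hk1p : k + 1 ≤ pos := by
    apply hback
    have e1 : i - ((k + 1 : Nat) : Int) * dx = i + -dx + (k : Int) * -dx := by push_cast; ring
    have e2 : j - ((k + 1 : Nat) : Int) * dy = j + -dy + (k : Int) * -dy := by push_cast; ring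
    rw [e1, e2]
    exact hkin
  have hposL : pos < L := by
    apply hLlt
    rw [← hpx, ← hpy]
    exact hij
  refine ⟨pos - (k + 1), k, hk1, by rw [hray]; simp; omega, ?_, Or.inr ⟨?_, ?_, ?_⟩⟩
  · intro t h1t htk
    rw [hray, getD_map_range _ _ _ (by omega), pvOppc_pair]
    have hs := (stopIdx_false_iff board player (-dx) (-dy) (i + -dx) (j + -dy) (k - t)).1
      (hstops (k - t) (by omega))
    have e1 : x0 + ((pos - (k + 1) + t : Nat) : Int) * dx = i + -dx + ((k - t : Nat) : Int) * -dx := by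
      rw [hpx]
      have c1 : ((pos - (k + 1) + t : Nat) : Int) = (pos : Int) - (k : Int) - 1 + (t : Int) := by omega
      have c2 : ((k - t : Nat) : Int) = (k : Int) - (t : Int) := by omega
      rw [c1, c2]; ring
    have e2 : y0 + ((pos - (k + 1) + t : Nat) : Int) * dy = j + -dy + ((k - t : Nat) : Int) * -dy := by
      rw [hpy]
      have c1 : ((pos - (k + 1) + t : Nat) : Int) = (pos : Int) - (k : Int) - 1 + (t : Int) := by omega
      have c2 : ((k - t : Nat) : Int) = (k : Int) - (t : Int) := by omega
      rw [c1, c2]; ring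
    rw [e1, e2]
    exact ⟨hs.2.1, hs.2.2⟩
  · rw [hray, getD_map_range _ _ _ (by omega), pvAt_pair]
    have e1 : x0 + ((pos - (k + 1) : Nat) : Int) * dx = i + -dx + (k : Int) * -dx := by
      rw [hpx]
      have c1 : ((pos - (k + 1) : Nat) : Int) = (pos : Int) - (k : Int) - 1 := by omega
      rw [c1]; ring
    have e2 : y0 + ((pos - (k + 1) : Nat) : Int) * dy = j + -dy + (k : Int) * -dy := by
      rw [hpy]
      have c1 : ((pos - (k + 1) : Nat) : Int) = (pos : Int) - (k : Int) - 1 := by omega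
      rw [c1]; ring
    rw [e1, e2]
    exact hkpl
  · have hidx : pos - (k + 1) + k + 1 = pos := by omega
    rw [hray, hidx, getD_map_range _ _ _ hposL, pvAt_pair, ← hpx, ← hpy]
    exact hcell
  · have hidx : pos - (k + 1) + k + 1 = pos := by omega
    rw [hray, hidx, getD_map_range _ _ _ hposL, ← hpx, ← hpy]

theorem capture_of_pat (board : List (List Int)) (player x0 y0 dx dy : Int) (z : Int × Int)
    (hbx : -1 ≤ dx ∧ dx ≤ 1) (hby : -1 ≤ dy ∧ dy ≤ 1) (hd1 : dx = 1 ∨ dy = 1)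
    (hx0 : 0 ≤ x0) (hy0 : 0 ≤ y0) (h0in : pvInB (board.length : Int) x0 y0 = true)
    (hp : player ≠ 0)
    (hpat : pvPat board player (pvRayAt board x0 y0 dx dy) z) :
    pvCell board z.2 z.1 = 0 ∧
      (pvMoveVia board player z.1 z.2 dx dy ∨ pvMoveVia board player z.1 z.2 (-dx) (-dy)) := by
  obtain ⟨L, hray, hLin, hLlt⟩ := ray_setup board x0 y0 dx dy hbx hby hd1 hx0 hy0 h0in
  obtain ⟨p, k, hk1, hlen, hmid, hcase⟩ := hpat
  rw [hray] at hlen hmid hcase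
  simp only [List.length_map, List.length_range] at hlen
  have hmid' : ∀ t, 1 ≤ t → t ≤ k →
      pvCell board (y0 + ((p + t : Nat) : Int) * dy) (x0 + ((p + t : Nat) : Int) * dx) ≠ 0 ∧
      pvCell board (y0 + ((p + t : Nat) : Int) * dy) (x0 + ((p + t : Nat) : Int) * dx) ≠ player := by
    intro t h1 h2
    have := hmid t h1 h2
    rw [getD_map_range _ _ _ (by omega)] at this
    exact this
  rcases hcase with ⟨hc0, hcp, hz⟩ | ⟨hcp, hc0, hz⟩
  · rw [getD_map_range _ _ _ (by omega), pvAt_pair] at hc0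
    rw [getD_map_range _ _ _ (by omega), pvAt_pair] at hcp
    rw [getD_map_range _ _ _ (by omega)] at hz
    subst hz
    refine ⟨hc0, Or.inl ⟨k, hk1, ?_, ?_, ?_, ?_⟩⟩
    · intro t ht
      rw [stopIdx_false_iff]
      have e1 : x0 + ((p : Nat) : Int) * dx + dx + (t : Int) * dx = x0 + ((p + 1 + t : Nat) : Int) * dx := by
        push_cast; ring
      have e2 : y0 + ((p : Nat) : Int) * dy + dy + (t : Int) * dy = y0 + ((p + 1 + t : Nat) : Int) * dy := by
        push_cast; ring
      rw [e1, e2]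
      refine ⟨hLin _ (by omega), ?_⟩
      have := hmid' (t + 1) (by omega) (by omega)
      have eidx : p + (t + 1) = p + 1 + t := by omega
      rw [eidx] at this
      exact this
    all_goals {
      have e1 : x0 + ((p : Nat) : Int) * dx + dx + (k : Int) * dx = x0 + ((p + k + 1 : Nat) : Int) * dx := by
        push_cast; ring
      have e2 : y0 + ((p : Nat) : Int) * dy + dy + (k : Int) * dy = y0 + ((p + k + 1 : Nat) : Int) * dy := by
        push_cast; ring
      rw [e1, e2]
      first
      | exact hLin _ (by omega)
      | (rw [hcp]; exact hp)
      | exact hcp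
    }
  · rw [getD_map_range _ _ _ (by omega), pvAt_pair] at hc0
    rw [getD_map_range _ _ _ (by omega), pvAt_pair] at hcp
    rw [getD_map_range _ _ _ (by omega)] at hz
    subst hz
    refine ⟨hc0, Or.inr ⟨k, hk1, ?_, ?_, ?_, ?_⟩⟩
    · intro t ht
      rw [stopIdx_false_iff]
      have e1 : x0 + ((p + k + 1 : Nat) : Int) * dx + -dx + (t : Int) * -dx = x0 + ((p + k - t : Nat) : Int) * dx := by
        have c1 : ((p + k - t : Nat) : Int) = (p : Int) + (k : Int) - (t : Int) := by omega
        rw [c1]; push_cast; ring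
      have e2 : y0 + ((p + k + 1 : Nat) : Int) * dy + -dy + (t : Int) * -dy = y0 + ((p + k - t : Nat) : Int) * dy := by
        have c1 : ((p + k - t : Nat) : Int) = (p : Int) + (k : Int) - (t : Int) := by omega
        rw [c1]; push_cast; ring
      rw [e1, e2]
      refine ⟨hLin _ (by omega), ?_⟩
      have := hmid' (k - t) (by omega) (by omega)
      have eidx : p + (k - t) = p + k - t := by omega
      rw [eidx] at this
      exact this
    all_goals {
      have e1 : x0 + ((p + k + 1 : Nat) : Int) * dx + -dx + (k : Int) * -dx = x0 + ((p : Nat) : Int) * dx := by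
        push_cast; ring
      have e2 : y0 + ((p + k + 1 : Nat) : Int) * dy + -dy + (k : Int) * -dy = y0 + ((p : Nat) : Int) * dy := by
        push_cast; ring
      rw [e1, e2]
      first
      | exact hLin _ (by omega)
      | (rw [hcp]; exact hp)
      | exact hcp
    }

-- ---- player = 0: both sides produce nothing ----

theorem whileA_fst_zero (board : List (List Int)) (dx dy : Int) :
    ∀ (fuel : Nat) (u v : Int) (line : List (Int × Int)),
      (pvWhileA board 0 dx dy fuel u v line).1 = false := by
  intro fuel
  induction fuel with
  | zero => intro u v line; rfl
  | succ f ih =>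
    intro u v line
    simp only [pvWhileA]
    by_cases hib : 0 ≤ u ∧ u < (board.length : Int) ∧ 0 ≤ v ∧ v < (board.length : Int)
    · rw [if_pos hib]
      by_cases h0 : pvCell board v u = 0
      · rw [if_pos h0]
      · rw [if_neg h0, if_neg h0]
        exact ih (u + dx) (v + dy) (line ++ [(u, v)])
    · rw [if_neg hib]

theorem find_lines_zero (board : List (List Int)) (i j : Int) :
    find_lines board i j 0 = [] := by
  unfold find_lines
  have h : ∀ (ds : List (Int × Int)) (acc : List (List (Int × Int))),
      ds.foldl (fun lines d =>
        let r := pvWhileA board 0 d.1 d.2 (board.length + 2) (i + d.1) (j + d.2) []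
        if r.1 && !r.2.isEmpty then lines ++ [r.2] else lines) acc = acc := by
    intro ds
    induction ds with
    | nil => intro acc; rfl
    | cons d ds ih =>
      intro acc
      rw [List.foldl_cons]
      have hf := whileA_fst_zero board d.1 d.2 (board.length + 2) (i + d.1) (j + d.2) []
      simp only [hf, Bool.false_and]
      exact ih acc
  exact h pvDirs []

theorem scan_fold_zero (board : List (List Int)) :
    ∀ (l : List (Int × Int)) (st : Option (Option (Int × Int)) × Bool × PySem.Set (Int × Int)),
      (∀ e, st.1 ≠ some (some e)) →
      (l.foldl (pvScanStep board 0) st).2.2 = st.2.2 := by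
  intro l
  induction l with
  | nil => intro st _; rfl
  | cons c l ih =>
    rintro ⟨left, inRun, ms⟩ hst
    rw [List.foldl_cons]
    by_cases hopp : pvAt board c ≠ 0 ∧ pvAt board c ≠ 0
    · have hstep : pvScanStep board 0 (left, inRun, ms) c = (left, true, ms) := by
        simp only [pvScanStep]
        rw [if_pos hopp]
      rw [hstep]
      exact ih (left, true, ms) hst
    · have h0 : pvAt board c = 0 := by tauto
      have hstep : pvScanStep board 0 (left, inRun, ms) c = (some none, false, ms) := by
        simp only [pvScanStep]
        rw [if_neg hopp, if_pos h0]
        rcases left with _ | _ | e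
        · cases inRun <;> rfl
        · cases inRun <;> rfl
        · exact absurd rfl (hst e)
      rw [hstep]
      exact ih (some none, false, ms) (by simp)

theorem movesB_zero (board : List (List Int)) :
    pvMovesB board 0 = PySem.Set.empty := by
  have hscan : ∀ (ms : PySem.Set (Int × Int)) (l : List (Int × Int)),
      pvScan board 0 ms l = ms := by
    intro ms l
    exact scan_fold_zero board l (none, false, ms) (by simp)
  have hfix : ∀ (l : List Int) (s : PySem.Set (Int × Int)),
      l.foldl (fun s _ => s) s = s := by
    intro l
    induction l with
    | nil => intro s; rfl
    | cons a l ih => intro s; rw [List.foldl_cons]; exact ih s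
  simp only [pvMovesB, hscan]
  rw [hfix, hfix, hfix, hfix]

-- ---- the pointwise equivalence and the verdict ----

theorem point_iff (board : List (List Int)) (player i j : Int) (hp : player ≠ 0)
    (hi : 0 ≤ i ∧ i < (board.length : Int)) (hj : 0 ≤ j ∧ j < (board.length : Int)) :
    (pvCell board j i = 0 ∧ (!(find_lines board i j player).isEmpty) = true) ↔
      (i, j) ∈ pvMovesB board player := by
  rw [mem_movesB board player hp]
  constructor
  · rintro ⟨h0, hf⟩
    obtain ⟨d, hd, hcond⟩ := (find_lines_char board player i j).1 hf
    have hfacts := pvDirs_facts d hd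
    have hmv := (condA_iff board player i j d.1 d.2 hfacts.1 hfacts.2 hi hj).1 hcond
    simp only [pvDirs, List.mem_cons, List.not_mem_nil, or_false] at hd
    rcases hd with rfl | rfl | rfl | rfl | rfl | rfl | rfl | rfl
    · -- d = (0, 1)
      refine Or.inr (Or.inl ⟨i, (PySem.List.mem_pyRange_one).2 ⟨hi.1, hi.2⟩, ?_⟩)
      exact pat_of_capture_fwd board player i 0 0 1 i j j.toNat
        ⟨by norm_num, by norm_num⟩ ⟨by norm_num, by norm_num⟩ (Or.inr rfl)
        hi.1 le_rfl (by simp [pvInB]; omega)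
        (by simp) (by rw [Int.toNat_of_nonneg hj.1]; ring) h0 hmv
    · -- d = (1, 1)
      by_cases hle : j ≤ i
      · refine Or.inr (Or.inr (Or.inl ⟨i - j,
          (PySem.List.mem_pyRange_one).2 ⟨by omega, by omega⟩, Or.inl ?_⟩))
        exact pat_of_capture_fwd board player (i - j) 0 1 1 i j j.toNat
          ⟨by norm_num, by norm_num⟩ ⟨by norm_num, by norm_num⟩ (Or.inl rfl)
          (by omega) le_rfl (by simp [pvInB]; omega)
          (by rw [Int.toNat_of_nonneg hj.1]; ring)
          (by rw [Int.toNat_of_nonneg hj.1]; ring) h0 hmv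
      · refine Or.inr (Or.inr (Or.inr ⟨j - i,
          (PySem.List.mem_pyRange_one).2 ⟨by omega, by omega⟩, Or.inl ?_⟩))
        exact pat_of_capture_fwd board player 0 (j - i) 1 1 i j i.toNat
          ⟨by norm_num, by norm_num⟩ ⟨by norm_num, by norm_num⟩ (Or.inl rfl)
          le_rfl (by omega) (by simp [pvInB]; omega)
          (by rw [Int.toNat_of_nonneg hi.1]; ring)
          (by rw [Int.toNat_of_nonneg hi.1]; ring) h0 hmv
    · -- d = (1, 0)
      refine Or.inl ⟨j, (PySem.List.mem_pyRange_one).2 ⟨hj.1, hj.2⟩, ?_⟩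
      exact pat_of_capture_fwd board player 0 j 1 0 i j i.toNat
        ⟨by norm_num, by norm_num⟩ ⟨by norm_num, by norm_num⟩ (Or.inl rfl)
        le_rfl hj.1 (by simp [pvInB]; omega)
        (by rw [Int.toNat_of_nonneg hi.1]; ring) (by simp) h0 hmv
    · -- d = (1, -1): backward along family (-1, 1)
      by_cases hlt : i + j < (board.length : Int)
      · refine Or.inr (Or.inr (Or.inl ⟨i + j,
          (PySem.List.mem_pyRange_one).2 ⟨by omega, by omega⟩, Or.inr ?_⟩))
        refine pat_of_capture_bwd board player (i + j) 0 (-1) 1 i j j.toNat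
          ⟨by norm_num, by norm_num⟩ ⟨by norm_num, by norm_num⟩ (Or.inr rfl)
          (by omega) le_rfl (by simp [pvInB]; omega)
          (by rw [Int.toNat_of_nonneg hj.1]; ring)
          (by rw [Int.toNat_of_nonneg hj.1]; ring)
          (by simp [pvInB]; omega) ?_ h0 ?_
        · intro s hs
          simp only [pvInB, mul_neg_one, mul_one, decide_eq_true_eq] at hs
          omega
        · simp only [neg_neg]
          exact hmv
      · refine Or.inr (Or.inr (Or.inr ⟨i + j - (board.length : Int) + 1,
          (PySem.List.mem_pyRange_one).2 ⟨by omega, by omega⟩, Or.inr ?_⟩))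
        refine pat_of_capture_bwd board player ((board.length : Int) - 1)
          (i + j - (board.length : Int) + 1) (-1) 1 i j ((board.length : Int) - 1 - i).toNat
          ⟨by norm_num, by norm_num⟩ ⟨by norm_num, by norm_num⟩ (Or.inr rfl)
          (by omega) (by omega) (by simp [pvInB]; omega)
          (by rw [Int.toNat_of_nonneg (by omega)]; ring)
          (by rw [Int.toNat_of_nonneg (by omega)]; ring)
          (by simp [pvInB]; omega) ?_ h0 ?_
        · intro s hs
          simp only [pvInB, mul_neg_one, mul_one, decide_eq_true_eq] at hs
          omega
        · simp only [neg_neg]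
          exact hmv
    · -- d = (0, -1)
      refine Or.inr (Or.inl ⟨i, (PySem.List.mem_pyRange_one).2 ⟨hi.1, hi.2⟩, ?_⟩)
      refine pat_of_capture_bwd board player i 0 0 1 i j j.toNat
        ⟨by norm_num, by norm_num⟩ ⟨by norm_num, by norm_num⟩ (Or.inr rfl)
        hi.1 le_rfl (by simp [pvInB]; omega)
        (by simp) (by rw [Int.toNat_of_nonneg hj.1]; ring)
        (by simp [pvInB]; omega) ?_ h0 ?_
      · intro s hs
        simp only [pvInB, mul_zero, mul_one, decide_eq_true_eq] at hs
        omega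
      · simp only [neg_zero]
        exact hmv
    · -- d = (-1, -1): backward along family (1, 1)
      by_cases hle : j ≤ i
      · refine Or.inr (Or.inr (Or.inl ⟨i - j,
          (PySem.List.mem_pyRange_one).2 ⟨by omega, by omega⟩, Or.inl ?_⟩))
        refine pat_of_capture_bwd board player (i - j) 0 1 1 i j j.toNat
          ⟨by norm_num, by norm_num⟩ ⟨by norm_num, by norm_num⟩ (Or.inl rfl)
          (by omega) le_rfl (by simp [pvInB]; omega)
          (by rw [Int.toNat_of_nonneg hj.1]; ring)
          (by rw [Int.toNat_of_nonneg hj.1]; ring)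
          (by simp [pvInB]; omega) ?_ h0 ?_
        · intro s hs
          simp only [pvInB, mul_one, decide_eq_true_eq] at hs
          omega
        · exact hmv
      · refine Or.inr (Or.inr (Or.inr ⟨j - i,
          (PySem.List.mem_pyRange_one).2 ⟨by omega, by omega⟩, Or.inl ?_⟩))
        refine pat_of_capture_bwd board player 0 (j - i) 1 1 i j i.toNat
          ⟨by norm_num, by norm_num⟩ ⟨by norm_num, by norm_num⟩ (Or.inl rfl)
          le_rfl (by omega) (by simp [pvInB]; omega)
          (by rw [Int.toNat_of_nonneg hi.1]; ring)
          (by rw [Int.toNat_of_nonneg hi.1]; ring)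
          (by simp [pvInB]; omega) ?_ h0 ?_
        · intro s hs
          simp only [pvInB, mul_one, decide_eq_true_eq] at hs
          omega
        · exact hmv
    · -- d = (-1, 0)
      refine Or.inl ⟨j, (PySem.List.mem_pyRange_one).2 ⟨hj.1, hj.2⟩, ?_⟩
      refine pat_of_capture_bwd board player 0 j 1 0 i j i.toNat
        ⟨by norm_num, by norm_num⟩ ⟨by norm_num, by norm_num⟩ (Or.inl rfl)
        le_rfl hj.1 (by simp [pvInB]; omega)
        (by rw [Int.toNat_of_nonneg hi.1]; ring) (by simp)
        (by simp [pvInB]; omega) ?_ h0 ?_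
      · intro s hs
        simp only [pvInB, mul_zero, mul_one, decide_eq_true_eq] at hs
        omega
      · simp only [neg_zero]
        exact hmv
    · -- d = (-1, 1)
      by_cases hlt : i + j < (board.length : Int)
      · refine Or.inr (Or.inr (Or.inl ⟨i + j,
          (PySem.List.mem_pyRange_one).2 ⟨by omega, by omega⟩, Or.inr ?_⟩))
        exact pat_of_capture_fwd board player (i + j) 0 (-1) 1 i j j.toNat
          ⟨by norm_num, by norm_num⟩ ⟨by norm_num, by norm_num⟩ (Or.inr rfl)
          (by omega) le_rfl (by simp [pvInB]; omega)
          (by rw [Int.toNat_of_nonneg hj.1]; ring)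
          (by rw [Int.toNat_of_nonneg hj.1]; ring) h0 hmv
      · refine Or.inr (Or.inr (Or.inr ⟨i + j - (board.length : Int) + 1,
          (PySem.List.mem_pyRange_one).2 ⟨by omega, by omega⟩, Or.inr ?_⟩))
        exact pat_of_capture_fwd board player ((board.length : Int) - 1)
          (i + j - (board.length : Int) + 1) (-1) 1 i j ((board.length : Int) - 1 - i).toNat
          ⟨by norm_num, by norm_num⟩ ⟨by norm_num, by norm_num⟩ (Or.inr rfl)
          (by omega) (by omega) (by simp [pvInB]; omega)
          (by rw [Int.toNat_of_nonneg (by omega)]; ring)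
          (by rw [Int.toNat_of_nonneg (by omega)]; ring) h0 hmv
  · intro hmem
    suffices hsuff : pvCell board j i = 0 ∧ ∃ d ∈ pvDirs, pvMoveVia board player i j d.1 d.2 by
      obtain ⟨h0, d, hd, hmv⟩ := hsuff
      exact ⟨h0, (find_lines_char board player i j).2 ⟨d, hd,
        (condA_iff board player i j d.1 d.2 (pvDirs_facts d hd).1 (pvDirs_facts d hd).2 hi hj).2 hmv⟩⟩
    rcases hmem with ⟨jj, hjj, hpat⟩ | ⟨ii, hii, hpat⟩ | ⟨ii, hii, hpat | hpat⟩ | ⟨jj, hjj, hpat | hpat⟩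
    · have hjj' := (PySem.List.mem_pyRange_one).1 hjj
      obtain ⟨h0, hc⟩ := capture_of_pat board player 0 jj 1 0 (i, j)
        ⟨by norm_num, by norm_num⟩ ⟨by norm_num, by norm_num⟩ (Or.inl rfl)
        le_rfl hjj'.1 (by simp [pvInB]; omega) hp hpat
      rcases hc with hc | hc
      · exact ⟨h0, (1, 0), by decide, hc⟩
      · refine ⟨h0, (-1, 0), by decide, ?_⟩
        simpa using hc
    · have hii' := (PySem.List.mem_pyRange_one).1 hii
      obtain ⟨h0, hc⟩ := capture_of_pat board player ii 0 0 1 (i, j)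
        ⟨by norm_num, by norm_num⟩ ⟨by norm_num, by norm_num⟩ (Or.inr rfl)
        hii'.1 le_rfl (by simp [pvInB]; omega) hp hpat
      rcases hc with hc | hc
      · exact ⟨h0, (0, 1), by decide, hc⟩
      · refine ⟨h0, (0, -1), by decide, ?_⟩
        simpa using hc
    · have hii' := (PySem.List.mem_pyRange_one).1 hii
      obtain ⟨h0, hc⟩ := capture_of_pat board player ii 0 1 1 (i, j)
        ⟨by norm_num, by norm_num⟩ ⟨by norm_num, by norm_num⟩ (Or.inl rfl)
        hii'.1 le_rfl (by simp [pvInB]; omega) hp hpat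
      rcases hc with hc | hc
      · exact ⟨h0, (1, 1), by decide, hc⟩
      · exact ⟨h0, (-1, -1), by decide, hc⟩
    · have hii' := (PySem.List.mem_pyRange_one).1 hii
      obtain ⟨h0, hc⟩ := capture_of_pat board player ii 0 (-1) 1 (i, j)
        ⟨by norm_num, by norm_num⟩ ⟨by norm_num, by norm_num⟩ (Or.inr rfl)
        hii'.1 le_rfl (by simp [pvInB]; omega) hp hpat
      rcases hc with hc | hc
      · exact ⟨h0, (-1, 1), by decide, hc⟩
      · refine ⟨h0, (1, -1), by decide, ?_⟩
        simpa using hc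
    · have hjj' := (PySem.List.mem_pyRange_one).1 hjj
      obtain ⟨h0, hc⟩ := capture_of_pat board player 0 jj 1 1 (i, j)
        ⟨by norm_num, by norm_num⟩ ⟨by norm_num, by norm_num⟩ (Or.inl rfl)
        le_rfl (by omega) (by simp [pvInB]; omega) hp hpat
      rcases hc with hc | hc
      · exact ⟨h0, (1, 1), by decide, hc⟩
      · exact ⟨h0, (-1, -1), by decide, hc⟩
    · have hjj' := (PySem.List.mem_pyRange_one).1 hjj
      obtain ⟨h0, hc⟩ := capture_of_pat board player ((board.length : Int) - 1) jj (-1) 1 (i, j)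
        ⟨by norm_num, by norm_num⟩ ⟨by norm_num, by norm_num⟩ (Or.inr rfl)
        (by omega) (by omega) (by simp [pvInB]; omega) hp hpat
      rcases hc with hc | hc
      · exact ⟨h0, (-1, 1), by decide, hc⟩
      · refine ⟨h0, (1, -1), by decide, ?_⟩
        simpa using hc

-- ===== VERDICT (by name: the statement is the Claim_ definition above) =====
theorem get_possible_moves_spec : Claim_equal_get_possible_moves := by
  intro board player _hDom _hPre
  unfold Spec_get_possible_moves get_possible_moves get_possible_moves_alt
  apply PySem.List.foldl_congr_mem
  intro acc i him
  apply PySem.List.foldl_congr_mem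
  intro acc2 j hjm
  have hi := (PySem.List.mem_pyRange_one).1 him
  have hj := (PySem.List.mem_pyRange_one).1 hjm
  by_cases hp : player = 0
  · subst hp
    have hA : (!(find_lines board i j 0).isEmpty) = false := by rw [find_lines_zero]; rfl
    have hB : (i, j) ∉ pvMovesB board 0 := by rw [movesB_zero]; simp [PySem.Set.empty]
    simp [hA, hB]
  · have hpoint := point_iff board player i j hp hi hj
    by_cases hc : PySem.Set.contains (pvMovesB board player) (i, j) = true
    · obtain ⟨h0, hf⟩ := hpoint.mpr ((PySem.Set.contains_iff _ _).1 hc)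
      rw [if_pos h0, if_pos hf, if_pos hc]
    · have hnc : ¬ (i, j) ∈ pvMovesB board player := fun h => hc ((PySem.Set.contains_iff _ _).2 h)
      rw [if_neg hc]
      by_cases h0 : pvCell board j i = 0
      · rw [if_pos h0]
        by_cases hf : (!(find_lines board i j player).isEmpty) = true
        · exact absurd (hpoint.mp ⟨h0, hf⟩) hnc
        · rw [if_neg hf]
      · rw [if_neg h0]
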